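-- pv_equiv track=rewrite | github.com/CenturyHSTech/Lab-Leaderboard | lab_leaderboard/leaderboard.py | get_a_or_b_day
-- ===== SOURCE A (Python) =====
-- def get_a_or_b_day(events: list) -> str:
--     """returns A, B, or No School based on school calendar
--
--     NOTE: Century's website has a link to an iCal feed, and we need code
--     [iCalFeed](https://www.hsd.k12.or.us/site/handlers/icalfeed.ashx?MIID=37)
--     [howto](https://learnpython.com/blog/working-with-icalendar-with-python/)
--     I will load the calendar, someone else can get it working.
--
--     Args:
--         events: a list of events from the calendar
--
--     Returns:
--         day: A if it's an 'A day', B if it's a 'B day', or 'No School' if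
--             neither.
--     """
--     day = "No School"
--     for event in events:
--         if "a day" in event.lower():
--             day = "A Day"
--         if "b day" in event.lower():
--             day = "B Day"
--     return day
-- ===== SOURCE B (Python) =====
-- def get_a_or_b_day(events: list) -> str:
--     """Backward short-circuiting search for the last decisive event."""
--     for event in reversed(events):
--         low = event.lower()
--         if "b day" in low:
--             return "B Day"
--         if "a day" in low:
--             return "A Day"
--     return "No School"
-- ===== Notes on version B (the rewrite author's own statement) =====
-- stated objective: idiomatic
-- what changed: Replaces the forward full-scan that keeps overwriting a state variable with a backward iteration that returns as soon as the last decisive event is found ('b day' checked before 'a day' to keep its override precedence), lowercasing each visited event once instead of twice.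
import Mathlib
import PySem

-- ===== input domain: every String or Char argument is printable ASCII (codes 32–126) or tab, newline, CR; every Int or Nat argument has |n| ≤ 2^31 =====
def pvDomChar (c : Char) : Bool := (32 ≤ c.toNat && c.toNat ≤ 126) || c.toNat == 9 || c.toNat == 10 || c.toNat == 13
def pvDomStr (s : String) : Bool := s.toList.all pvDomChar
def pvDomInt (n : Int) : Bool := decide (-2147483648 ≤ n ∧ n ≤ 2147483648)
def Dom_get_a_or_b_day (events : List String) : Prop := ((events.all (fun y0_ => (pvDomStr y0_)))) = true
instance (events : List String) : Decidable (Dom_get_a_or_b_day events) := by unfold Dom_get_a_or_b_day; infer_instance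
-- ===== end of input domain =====

-- B: same decision, but a backward short-circuiting search instead of a forward scan-and-overwrite (idiomatic; return value only).
-- ===== PORT A =====
def get_a_or_b_day (events : List String) : String :=
  events.foldl (fun day event =>
    let day1 := if PySem.Str.isIn "a day" (PySem.Str.lower event) then "A Day" else day
    if PySem.Str.isIn "b day" (PySem.Str.lower event) then "B Day" else day1) "No School"

-- ===== PORT B =====
def revSearch : List String → String
  | [] => "No School"
  | event :: rest =>
    let low := PySem.Str.lower event
    if PySem.Str.isIn "b day" low then "B Day"
    else if PySem.Str.isIn "a day" low then "A Day"
    else revSearch rest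

def get_a_or_b_day_alt (events : List String) : String := revSearch events.reverse

-- ===== PRECONDITION & SPEC =====
def Spec_get_a_or_b_day (events : List String) (out : String) : Prop := out = get_a_or_b_day_alt events
instance (events : List String) (out : String) : Decidable (Spec_get_a_or_b_day events out) := by unfold Spec_get_a_or_b_day; infer_instance

-- ===== CLAIM (what is proved, stated in full; the proofs are below) =====
def Claim_equal_get_a_or_b_day : Prop := ∀ (events : List String), Dom_get_a_or_b_day events → Spec_get_a_or_b_day events (get_a_or_b_day events)

-- ===== LEMMAS AND PROOFS =====

-- revSearch with an arbitrary default, to carry the fold's accumulator through the induction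
def revSearchD (d : String) : List String → String
  | [] => d
  | event :: rest =>
    if PySem.Str.isIn "b day" (PySem.Str.lower event) then "B Day"
    else if PySem.Str.isIn "a day" (PySem.Str.lower event) then "A Day"
    else revSearchD d rest

theorem foldl_eq_revSearchD (events : List String) (d : String) :
    events.foldl (fun day event =>
      let day1 := if PySem.Str.isIn "a day" (PySem.Str.lower event) then "A Day" else day
      if PySem.Str.isIn "b day" (PySem.Str.lower event) then "B Day" else day1) d
    = revSearchD d events.reverse := by
  induction events using List.reverseRecOn generalizing d with
  | nil => rfl
  | append_singleton xs x ih =>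
    rw [List.foldl_append, List.reverse_append]
    simp only [List.foldl_cons, List.foldl_nil, List.reverse_singleton, List.singleton_append,
      revSearchD]
    rw [ih]

theorem revSearchD_noSchool (events : List String) :
    revSearchD "No School" events = revSearch events := by
  induction events with
  | nil => rfl
  | cons x xs ih => simp only [revSearchD, revSearch, ih]

-- ===== VERDICT (by name: the statement is the Claim_ definition above) =====
theorem get_a_or_b_day_spec : Claim_equal_get_a_or_b_day := by
  intro events _
  show get_a_or_b_day events = get_a_or_b_day_alt events
  unfold get_a_or_b_day get_a_or_b_day_alt
  rw [foldl_eq_revSearchD, revSearchD_noSchool]
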